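-- pv_equiv track=rewrite | github.com/NicoPuc/ProyectosUniversitarios | 1-Introducción A Programación/Tarea2/Tarea2_1.py | tabu
-- ===== SOURCE A (Python) =====
-- def contar_coincidencias(lista_descripciones, descripcion_animal):
--     c = 0
--     for i in lista_descripciones:
--         if i in descripcion_animal:
--             c += 1
--     return c
--
-- def tabu(a):
--     lista = []
--     c_gato = contar_coincidencias(a, gato)
--     c_perro = contar_coincidencias(a, perro)
--     c_raton = contar_coincidencias(a, raton)
--     c_jirafa = contar_coincidencias(a, jirafa)
--     c_elefante = contar_coincidencias(a, elefante)
--     c_tigre = contar_coincidencias(a, tigre)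
--     c_leon = contar_coincidencias(a, leon)
--     c_avestruz = contar_coincidencias(a, avestruz)
--     c_canario = contar_coincidencias(a, canario)
--     lista.append(c_gato)
--     lista.append(c_perro)
--     lista.append(c_raton)
--     lista.append(c_jirafa)
--     lista.append(c_elefante)
--     lista.append(c_tigre)
--     lista.append(c_leon)
--     lista.append(c_avestruz)
--     lista.append(c_canario)
--     m = max(lista)
--     p = 0
--     for i in lista:
--         if m == i:
--             p += 1
--     if p == 1:
--         ind = lista.index(m)
--         if ind == 0:
--             return 'gato'
--         elif ind == 1:
--             return 'perro'
--         elif ind == 2: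
--             return 'raton'
--         elif ind == 3:
--             return 'jirafa'
--         elif ind == 4:
--             return 'elefante'
--         elif ind == 5:
--             return 'tigre'
--         elif ind == 6:
--             return 'leon'
--         elif ind == 7:
--             return 'avestruz'
--         elif ind == 8:
--             return 'canario'
--     else:
--         return 'empate'
--
-- gato = ['domestico', 'felino', 'peludo', 'maulla', 'chico', 'tierno']
--
-- perro = ['domestico', 'peludo', 'ladra', 'tierno', 'leal', 'mediano']
--
-- raton = ['chico', 'gris', 'chef', 'cola', 'roedor', 'plaga']
--
-- jirafa = ['salvaje', 'grande', 'africa', 'cuello', 'manchado', 'arboles']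
--
-- elefante = ['africa', 'salvaje', 'grande', 'gris', 'herbivoro', 'trompa']
--
-- tigre = ['india', 'salvaje', 'naranja', 'grande', 'felino', 'rayado']
--
-- leon = ['africa', 'amarillo', 'ruge', 'melena', 'grande', 'felino']
--
-- avestruz = ['africa', 'plumas', 'cuello', 'oviparo', 'corre', 'gris']
--
-- canario = ['plumas', 'vuela', 'oviparo', 'canta', 'domestico', 'amarillo']
-- ===== SOURCE B (Python) =====
-- gato = ['domestico', 'felino', 'peludo', 'maulla', 'chico', 'tierno']
-- perro = ['domestico', 'peludo', 'ladra', 'tierno', 'leal', 'mediano']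
-- raton = ['chico', 'gris', 'chef', 'cola', 'roedor', 'plaga']
-- jirafa = ['salvaje', 'grande', 'africa', 'cuello', 'manchado', 'arboles']
-- elefante = ['africa', 'salvaje', 'grande', 'gris', 'herbivoro', 'trompa']
-- tigre = ['india', 'salvaje', 'naranja', 'grande', 'felino', 'rayado']
-- leon = ['africa', 'amarillo', 'ruge', 'melena', 'grande', 'felino']
-- avestruz = ['africa', 'plumas', 'cuello', 'oviparo', 'corre', 'gris']
-- canario = ['plumas', 'vuela', 'oviparo', 'canta', 'domestico', 'amarillo']
--
-- ANIMALS = [('gato', gato), ('perro', perro), ('raton', raton), ('jirafa', jirafa),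
--            ('elefante', elefante), ('tigre', tigre), ('leon', leon),
--            ('avestruz', avestruz), ('canario', canario)]
--
-- def tabu(a):
--     # single data-driven pass: running best (name, count) plus a tie flag
--     best, best_count, tie = 'empate', -1, False
--     for name, desc in ANIMALS:
--         c = sum(1 for d in a if d in desc)
--         if c > best_count:
--             best, best_count, tie = name, c, False
--         elif c == best_count:
--             tie = True
--     return 'empate' if tie else best
-- ===== Notes on version B (the rewrite author's own statement) =====
-- stated objective: simpler
-- what changed: Replaces the nine hardcoded count variables, the separate max/tie-count/index passes and the nine-branch index-to-name ladder by one data-driven loop over an (name, descriptors) table that keeps a running best count, best name and tie flag.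
import Mathlib
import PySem

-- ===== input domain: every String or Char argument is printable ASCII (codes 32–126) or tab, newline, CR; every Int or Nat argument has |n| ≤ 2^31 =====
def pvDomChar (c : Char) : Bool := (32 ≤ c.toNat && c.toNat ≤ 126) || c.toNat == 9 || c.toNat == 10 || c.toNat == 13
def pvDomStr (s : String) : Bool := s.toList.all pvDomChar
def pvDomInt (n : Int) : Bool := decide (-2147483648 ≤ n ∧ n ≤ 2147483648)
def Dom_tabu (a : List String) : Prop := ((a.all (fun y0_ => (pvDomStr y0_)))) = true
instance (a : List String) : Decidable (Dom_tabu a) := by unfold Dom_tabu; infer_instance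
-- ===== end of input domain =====

-- B replaces A's nine hardcoded count variables, separate max / tie-count / index passes and
-- nine-branch index-to-name ladder by one data-driven pass over a (name, descriptors) table
-- keeping a running best name, best count and tie flag (objective: simpler).

-- ===== PORT A =====
-- module-level descriptor constants (shared data, used by both programs)
def pvGato : List String := ["domestico", "felino", "peludo", "maulla", "chico", "tierno"]
def pvPerro : List String := ["domestico", "peludo", "ladra", "tierno", "leal", "mediano"]
def pvRaton : List String := ["chico", "gris", "chef", "cola", "roedor", "plaga"]
def pvJirafa : List String := ["salvaje", "grande", "africa", "cuello", "manchado", "arboles"]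
def pvElefante : List String := ["africa", "salvaje", "grande", "gris", "herbivoro", "trompa"]
def pvTigre : List String := ["india", "salvaje", "naranja", "grande", "felino", "rayado"]
def pvLeon : List String := ["africa", "amarillo", "ruge", "melena", "grande", "felino"]
def pvAvestruz : List String := ["africa", "plumas", "cuello", "oviparo", "corre", "gris"]
def pvCanario : List String := ["plumas", "vuela", "oviparo", "canta", "domestico", "amarillo"]

def contar_coincidencias (lista descripcion_animal : List String) : Int :=
  lista.foldl (fun c i => if descripcion_animal.contains i then c + 1 else c) 0

def tabu (a : List String) : String :=
  let c_gato := contar_coincidencias a pvGato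
  let c_perro := contar_coincidencias a pvPerro
  let c_raton := contar_coincidencias a pvRaton
  let c_jirafa := contar_coincidencias a pvJirafa
  let c_elefante := contar_coincidencias a pvElefante
  let c_tigre := contar_coincidencias a pvTigre
  let c_leon := contar_coincidencias a pvLeon
  let c_avestruz := contar_coincidencias a pvAvestruz
  let c_canario := contar_coincidencias a pvCanario
  let lista : List Int := [c_gato, c_perro, c_raton, c_jirafa, c_elefante, c_tigre, c_leon,
    c_avestruz, c_canario]
  let m : Int := (PySem.List.max? lista (fun y => y)).getD 0  -- lista is nonempty: max() never raises
  let p : Int := lista.foldl (fun p i => if m == i then p + 1 else p) 0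
  if p == 1 then
    let ind : Nat := (PySem.List.index? lista m).getD 0  -- m ∈ lista: .index never raises
    if ind == 0 then "gato"
    else if ind == 1 then "perro"
    else if ind == 2 then "raton"
    else if ind == 3 then "jirafa"
    else if ind == 4 then "elefante"
    else if ind == 5 then "tigre"
    else if ind == 6 then "leon"
    else if ind == 7 then "avestruz"
    else if ind == 8 then "canario"
    else ""  -- unreachable: ind ≤ 8
  else "empate"

-- ===== PORT B =====
def pvAnimals : List (String × List String) :=
  [("gato", pvGato), ("perro", pvPerro), ("raton", pvRaton), ("jirafa", pvJirafa),
   ("elefante", pvElefante), ("tigre", pvTigre), ("leon", pvLeon), ("avestruz", pvAvestruz),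
   ("canario", pvCanario)]

def tabu_alt (a : List String) : String :=
  let st :=
    pvAnimals.foldl
      (fun st q =>
        let c : Int := ((a.filter (fun d => q.2.contains d)).map (fun _ => (1 : Int))).sum
        if c > st.2.1 then (q.1, c, false)
        else if c == st.2.1 then (st.1, st.2.1, true)
        else st)
      ("empate", -1, false)
  if st.2.2 then "empate" else st.1

-- ===== PRECONDITION & SPEC =====
def Spec_tabu (a : List String) (out : String) : Prop := out = tabu_alt a
instance (a : List String) (out : String) : Decidable (Spec_tabu a out) := by unfold Spec_tabu; infer_instance

-- ===== CLAIM (what is proved, stated in full; the proofs are below) =====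
def Claim_equal_tabu : Prop := ∀ (a : List String), Dom_tabu a → Spec_tabu a (tabu a)


-- ===== LEMMAS AND PROOFS =====

-- abstract step of B's single pass and its characterisation
def pvStep (st : String × Int × Bool) (q : String × Int) : String × Int × Bool :=
  if q.2 > st.2.1 then (q.1, q.2, false)
  else if q.2 == st.2.1 then (st.1, st.2.1, true)
  else st

def pvM (l : List (String × Int)) : Int := (l.map Prod.snd).foldl max (-1)

def pvName (l : List (String × Int)) (m : Int) : String :=
  ((l.find? (fun q => q.2 == m)).map Prod.fst).getD "empate"

lemma pvBeqComm (v i : Int) : (v == i) = (i == v) := by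
  by_cases h : v = i
  · simp [h]
  · rw [beq_eq_false_iff_ne.mpr h, beq_eq_false_iff_ne.mpr (Ne.symm h)]

lemma pvCount_eq (a desc : List String) :
    ((a.filter (fun d => desc.contains d)).map (fun _ => (1 : Int))).sum =
      contar_coincidencias a desc := by
  rw [contar_coincidencias, PySem.List.foldl_count_if, PySem.List.sum_map_const_int,
    List.countP_eq_length_filter]
  have hco : desc.contains = (fun d => decide (d ∈ desc)) := by
    funext d
    by_cases h : d ∈ desc <;> simp [h]
  rw [hco]
  simp

lemma pvContar_nonneg (a desc : List String) : 0 ≤ contar_coincidencias a desc := by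
  rw [contar_coincidencias, PySem.List.foldl_count_if]
  omega

lemma pvM_mem {l : List (String × Int)} (h : 0 ≤ pvM l) : pvM l ∈ l.map Prod.snd := by
  unfold pvM at *
  rcases PySem.List.foldl_max_mem (l.map Prod.snd) (-1) with h' | h'
  · omega
  · exact h'

lemma pvFold_eq (l : List (String × Int)) :
    (∀ q ∈ l, 0 ≤ q.2) →
    l.foldl pvStep ("empate", -1, false) =
      (pvName l (pvM l), pvM l, decide (2 ≤ (l.map Prod.snd).count (pvM l))) := by
  induction l using List.reverseRecOn with
  | nil => intro _; simp [pvName, pvM]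
  | append_singleton t q ih =>
    intro h
    have ht : ∀ r ∈ t, 0 ≤ r.2 := fun r hr => h r (List.mem_append_left _ hr)
    have hq : 0 ≤ q.2 := h q (List.mem_append_right _ (List.mem_singleton_self _))
    have hle : ∀ y ∈ t.map Prod.snd, y ≤ pvM t :=
      (PySem.List.le_foldl_max (t.map Prod.snd) (-1)).2
    have hM' : pvM (t ++ [q]) = max (pvM t) q.2 := by
      simp [pvM, List.map_append, List.foldl_append]
    rw [List.foldl_append, List.foldl_cons, List.foldl_nil, ih ht]
    rcases lt_trichotomy (pvM t) q.2 with hlt | heq | hgt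
    · have hmax : pvM (t ++ [q]) = q.2 := by rw [hM']; exact max_eq_right (le_of_lt hlt)
      have hnot : q.2 ∉ t.map Prod.snd := fun hmem => absurd (hle _ hmem) (not_le.mpr hlt)
      have hcnt : (t.map Prod.snd).count q.2 = 0 := List.count_eq_zero.mpr hnot
      have hfind : t.find? (fun r => r.2 == q.2) = none := by
        rw [List.find?_eq_none]
        intro r hr hb
        have hrq : r.2 = q.2 := by simpa using hb
        exact hnot (hrq ▸ List.mem_map_of_mem hr)
      simp [pvStep, hlt, hmax, pvName, List.find?_append, hfind, List.map_append,
        List.count_append, hcnt]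
    · have hM0 : 0 ≤ pvM t := by omega
      have hmax : pvM (t ++ [q]) = pvM t := by rw [hM', ← heq, max_self]
      have hmem : pvM t ∈ t.map Prod.snd := pvM_mem hM0
      have hcnt : 1 ≤ (t.map Prod.snd).count (pvM t) := List.count_pos_iff.mpr hmem
      obtain ⟨r, hr, hr2⟩ := List.mem_map.mp hmem
      have hcond1 : ¬ (q.2 > pvM t) := by omega
      have hcond2 : (q.2 == pvM t) = true := by rw [beq_iff_eq]; omega
      cases hft : t.find? (fun x => x.2 == pvM t) with
      | none =>
        have hno := List.find?_eq_none.mp hft r hr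
        simp [hr2] at hno
      | some x =>
        simp [pvStep, hcond1, hcond2, hmax, pvName, List.find?_append, hft, List.map_append,
          List.count_append, List.count_cons, List.count_nil, hmem]
    · have hM0 : 0 ≤ pvM t := by omega
      have hmax : pvM (t ++ [q]) = pvM t := by rw [hM', max_eq_left (le_of_lt hgt)]
      have hmem : pvM t ∈ t.map Prod.snd := pvM_mem hM0
      obtain ⟨r, hr, hr2⟩ := List.mem_map.mp hmem
      have hcond1 : ¬ (q.2 > pvM t) := by omega
      have hcond2 : (q.2 == pvM t) = false := by rw [beq_eq_false_iff_ne]; omega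
      cases hft : t.find? (fun x => x.2 == pvM t) with
      | none =>
        have hno := List.find?_eq_none.mp hft r hr
        simp [hr2] at hno
      | some x =>
        simp [pvStep, hcond1, hcond2, hmax, pvName, List.find?_append, hft, List.map_append,
          List.count_append, List.count_cons, List.count_nil]

lemma pvFindIdx : ∀ (l : List (String × Int)) (m : Int) (k : Nat),
    PySem.List.index? (l.map Prod.snd) m = some k →
    (l.find? (fun q => q.2 == m)).map Prod.fst = (l.map Prod.fst)[k]? := by
  intro l
  induction l with
  | nil => intro m k hk; rw [PySem.List.index?_eq_idxOf?] at hk; simp at hk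
  | cons q t ih =>
    intro m k hk
    by_cases hq : q.2 = m
    · rw [List.map_cons, show q.2 = m from hq, PySem.List.index?_cons_self] at hk
      obtain rfl : (0 : Nat) = k := Option.some.inj hk
      simp [hq]
    · rw [List.map_cons, PySem.List.index?_cons_of_ne _ hq] at hk
      cases hidx : PySem.List.index? (t.map Prod.snd) m with
      | none => rw [hidx] at hk; simp at hk
      | some k' =>
        rw [hidx] at hk
        simp only [Option.map_some, Option.some.injEq] at hk
        subst hk
        have hqf : (q.2 == m) = false := beq_eq_false_iff_ne.mpr hq
        simp only [List.find?_cons, hqf, List.map_cons,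
          List.getElem?_cons_succ]
        exact ih m k' hidx

lemma pvKey (c0 c1 c2 c3 c4 c5 c6 c7 c8 : Int) (h0 : 0 ≤ c0) (h1 : 0 ≤ c1) (h2 : 0 ≤ c2)
    (h3 : 0 ≤ c3) (h4 : 0 ≤ c4) (h5 : 0 ≤ c5) (h6 : 0 ≤ c6) (h7 : 0 ≤ c7) (h8 : 0 ≤ c8) :
    (let lista : List Int := [c0, c1, c2, c3, c4, c5, c6, c7, c8]
     let m : Int := (PySem.List.max? lista (fun y => y)).getD 0
     let p : Int := lista.foldl (fun p i => if m == i then p + 1 else p) 0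
     if p == 1 then
       let ind : Nat := (PySem.List.index? lista m).getD 0
       if ind == 0 then "gato"
       else if ind == 1 then "perro"
       else if ind == 2 then "raton"
       else if ind == 3 then "jirafa"
       else if ind == 4 then "elefante"
       else if ind == 5 then "tigre"
       else if ind == 6 then "leon"
       else if ind == 7 then "avestruz"
       else if ind == 8 then "canario"
       else ""
     else "empate") =
    (let l : List (String × Int) := [("gato", c0), ("perro", c1), ("raton", c2), ("jirafa", c3),
       ("elefante", c4), ("tigre", c5), ("leon", c6), ("avestruz", c7), ("canario", c8)]
     let st := l.foldl pvStep ("empate", -1, false)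
     if st.2.2 then "empate" else st.1) := by
  set L : List (String × Int) := [("gato", c0), ("perro", c1), ("raton", c2), ("jirafa", c3),
    ("elefante", c4), ("tigre", c5), ("leon", c6), ("avestruz", c7), ("canario", c8)] with hLdef
  have hl : ∀ q ∈ L, 0 ≤ q.2 := by
    intro q hq
    simp only [hLdef, List.mem_cons, List.not_mem_nil, or_false] at hq
    rcases hq with rfl | rfl | rfl | rfl | rfl | rfl | rfl | rfl | rfl <;> assumption
  have hsnd : L.map Prod.snd = [c0, c1, c2, c3, c4, c5, c6, c7, c8] := rfl
  have hfst : L.map Prod.fst =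
      ["gato", "perro", "raton", "jirafa", "elefante", "tigre", "leon", "avestruz", "canario"] := rfl
  have hm : List.foldl max c0 [c1, c2, c3, c4, c5, c6, c7, c8] = pvM L := by
    rw [pvM, hsnd]
    conv_rhs => rw [List.foldl_cons]
    rw [max_eq_right (show (-1 : Int) ≤ c0 by omega)]
  have hM0 : 0 ≤ pvM L := by
    have h' := (PySem.List.le_foldl_max [c1, c2, c3, c4, c5, c6, c7, c8] c0).1
    omega
  have hmem : pvM L ∈ ([c0, c1, c2, c3, c4, c5, c6, c7, c8] : List Int) := by
    have h' := pvM_mem hM0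
    rwa [hsnd] at h'
  simp only [PySem.List.max?_id_cons, Option.getD_some]
  rw [hm, PySem.List.foldl_count_if]
  have hcount : List.countP (BEq.beq (pvM L)) [c0, c1, c2, c3, c4, c5, c6, c7, c8]
      = ([c0, c1, c2, c3, c4, c5, c6, c7, c8] : List Int).count (pvM L) := by
    have hflip : (BEq.beq (pvM L)) = (fun i : Int => i == pvM L) :=
      funext fun i => pvBeqComm _ _
    rw [hflip]
    simp [List.count]
  rw [hcount, pvFold_eq L hl, hsnd]
  by_cases hc : ([c0, c1, c2, c3, c4, c5, c6, c7, c8] : List Int).count (pvM L) = 1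
  · have hidx : (PySem.List.index? [c0, c1, c2, c3, c4, c5, c6, c7, c8] (pvM L)).isSome :=
      (PySem.List.index?_isSome_iff _ _).mpr hmem
    obtain ⟨k, hk⟩ := Option.isSome_iff_exists.mp hidx
    obtain ⟨hklt, -, -⟩ := PySem.List.getElem_of_index?_eq_some hk
    have hk9 : k < 9 := by simpa using hklt
    have hpn : pvName L (pvM L) = ((["gato", "perro", "raton", "jirafa", "elefante", "tigre",
        "leon", "avestruz", "canario"] : List String)[k]?).getD "empate" := by
      rw [pvName, pvFindIdx L (pvM L) k (by rw [hsnd]; exact hk), hfst]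
    rw [hk, hc, hpn]
    simp only [Option.getD_some]
    norm_num
    interval_cases k <;> rfl
  · have h1 : 1 ≤ ([c0, c1, c2, c3, c4, c5, c6, c7, c8] : List Int).count (pvM L) :=
      List.count_pos_iff.mpr hmem
    have hcond : ((0 + (([c0, c1, c2, c3, c4, c5, c6, c7, c8] : List Int).count (pvM L) : Int))
        == 1) = false := by
      rw [beq_eq_false_iff_ne]
      omega
    rw [hcond]
    simp [show 2 ≤ ([c0, c1, c2, c3, c4, c5, c6, c7, c8] : List Int).count (pvM L) by omega]

-- ===== VERDICT (by name: the statement is the Claim_ definition above) =====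
theorem tabu_spec : Claim_equal_tabu := by
  intro a _
  unfold Spec_tabu
  have hfun : (fun (st : String × Int × Bool) (q : String × List String) =>
      let c : Int := ((a.filter (fun d => q.2.contains d)).map (fun _ => (1 : Int))).sum
      if c > st.2.1 then (q.1, c, false)
      else if c == st.2.1 then (st.1, st.2.1, true)
      else st) =
      (fun x y => pvStep x ((fun q : String × List String =>
        (q.1, contar_coincidencias a q.2)) y)) := by
    funext st q
    simp only [pvStep, pvCount_eq]
  have hB : tabu_alt a =
      (let l : List (String × Int) := [("gato", contar_coincidencias a pvGato),
         ("perro", contar_coincidencias a pvPerro), ("raton", contar_coincidencias a pvRaton),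
         ("jirafa", contar_coincidencias a pvJirafa),
         ("elefante", contar_coincidencias a pvElefante),
         ("tigre", contar_coincidencias a pvTigre), ("leon", contar_coincidencias a pvLeon),
         ("avestruz", contar_coincidencias a pvAvestruz),
         ("canario", contar_coincidencias a pvCanario)]
       let st := l.foldl pvStep ("empate", -1, false)
       if st.2.2 then "empate" else st.1) := by
    unfold tabu_alt
    rw [hfun, ← List.foldl_map]
    rfl
  rw [hB]
  exact pvKey (contar_coincidencias a pvGato) (contar_coincidencias a pvPerro)
    (contar_coincidencias a pvRaton) (contar_coincidencias a pvJirafa)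
    (contar_coincidencias a pvElefante) (contar_coincidencias a pvTigre)
    (contar_coincidencias a pvLeon) (contar_coincidencias a pvAvestruz)
    (contar_coincidencias a pvCanario) (pvContar_nonneg a pvGato) (pvContar_nonneg a pvPerro)
    (pvContar_nonneg a pvRaton) (pvContar_nonneg a pvJirafa) (pvContar_nonneg a pvElefante)
    (pvContar_nonneg a pvTigre) (pvContar_nonneg a pvLeon) (pvContar_nonneg a pvAvestruz)
    (pvContar_nonneg a pvCanario)
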